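-- pv_equiv track=rewrite | github.com/oleksandr-san/aoc | 2019/day-4-secure-container/main.py | has_adjacent_pair
-- ===== SOURCE A (Python) =====
-- def has_adjacent_pair(value):
--     group_size = 1
--     for i in range(1, len(value)):
--         if value[i] == value[i - 1]:
--             group_size += 1
--         elif group_size == 2:
--             return True
--         else:
--             group_size = 1
--     return group_size == 2
-- ===== SOURCE B (Python) =====
-- def has_adjacent_pair(value):
--     i, n = 0, len(value)
--     while i < n:
--         j = i
--         while j < n and value[j] == value[i]:
--             j += 1
--         if j - i == 2:
--             return True
--         i = j
--     return False
-- ===== Notes on version B (the rewrite author's own statement) =====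
-- stated objective: alternative
-- what changed: B scans maximal runs of equal characters with a two-pointer inner loop and tests each run's length for exactly 2, instead of A's single pass maintaining a group_size counter with a three-way if/elif/else.
import Mathlib
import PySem

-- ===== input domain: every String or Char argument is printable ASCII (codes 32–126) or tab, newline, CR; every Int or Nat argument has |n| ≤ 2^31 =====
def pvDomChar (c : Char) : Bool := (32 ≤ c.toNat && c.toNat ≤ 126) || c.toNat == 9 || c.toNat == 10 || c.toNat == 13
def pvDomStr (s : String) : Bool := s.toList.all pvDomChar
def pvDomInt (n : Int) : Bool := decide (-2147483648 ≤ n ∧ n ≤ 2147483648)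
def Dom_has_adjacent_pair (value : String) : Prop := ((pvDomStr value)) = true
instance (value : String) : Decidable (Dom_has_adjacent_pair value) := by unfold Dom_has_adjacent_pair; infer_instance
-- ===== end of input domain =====

-- B scans maximal runs of equal characters (two-pointer style) and tests each run's
-- length for exactly 2, instead of A's group_size counter with if/elif/else; same cost.


-- ===== PORT A =====
-- A's loop over i in range(1, len(value)) with state group_size, comparing value[i]
-- with value[i-1]; rendered as structural recursion carrying (prev char, group_size).
def hapLoop (prev : Char) (group_size : Int) : List Char → Bool
  | [] => group_size == 2
  | c :: rest =>
    if c == prev then hapLoop c (group_size + 1) rest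
    else if group_size == 2 then true
    else hapLoop c 1 rest

def has_adjacent_pair (value : String) : Bool :=
  match value.toList with
  | [] => (1 : Int) == 2
  | c :: rest => hapLoop c 1 rest

-- ===== PORT B =====
-- B's outer loop: take the maximal run at the front (inner scan), test its length == 2,
-- then continue after the run.
def altLoop : List Char → Bool
  | [] => false
  | c :: rest =>
    if (rest.takeWhile (· == c)).length + 1 == 2 then true
    else altLoop (rest.dropWhile (· == c))
termination_by l => l.length
decreasing_by
  have := List.length_dropWhile_le (p := (· == c)) (l := rest)
  simp; omega

def has_adjacent_pair_alt (value : String) : Bool := altLoop value.toList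

-- ===== PRECONDITION & SPEC =====
def Spec_has_adjacent_pair (value : String) (out : Bool) : Prop := out = has_adjacent_pair_alt value
instance (value : String) (out : Bool) : Decidable (Spec_has_adjacent_pair value out) := by unfold Spec_has_adjacent_pair; infer_instance

-- ===== CLAIM (what is proved, stated in full; the proofs are below) =====
def Claim_equal_has_adjacent_pair : Prop := ∀ (value : String), Dom_has_adjacent_pair value → Spec_has_adjacent_pair value (has_adjacent_pair value)

-- ===== LEMMAS AND PROOFS =====

-- A's counter loop, started with count group_size of the current run of prev, equals:
-- "the current run's total length is 2, or B's run scan finds a 2-run in the remainder".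
theorem hapLoop_eq (rest : List Char) : ∀ (prev : Char) (group_size : Int),
    hapLoop prev group_size rest =
      ((group_size + ((rest.takeWhile (· == prev)).length : Int) == 2)
        || altLoop (rest.dropWhile (· == prev))) := by
  induction rest with
  | nil => intro prev gs; simp [hapLoop, altLoop]
  | cons c r ih =>
    intro prev gs
    by_cases h : c = prev
    · subst h
      simp only [hapLoop, List.takeWhile, List.dropWhile, beq_self_eq_true]
      rw [ih c (gs + 1)]
      simp only [List.length_cons]
      push_cast; rw [show gs + 1 + ((r.takeWhile (· == c)).length : Int)
            = gs + (((r.takeWhile (· == c)).length : Int) + 1) by ring]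
    · have hb : (c == prev) = false := by simp [h]
      simp only [hapLoop, List.takeWhile, List.dropWhile, hb]
      by_cases hg : gs = 2
      · simp [hg, altLoop]
      · have : (gs == 2) = false := by simp [hg]
        simp only [this, List.length_nil]
        rw [ih c 1]
        simp only [altLoop]
        by_cases h2 : (r.takeWhile (· == c)).length + 1 = 2
        · simp [h2]; omega
        · have hbe : ((r.takeWhile (· == c)).length + 1 == 2) = false := by
            simp only [beq_eq_false_iff_ne, ne_eq]; omega
          have hbe2 : ((1 : Int) + ((r.takeWhile (· == c)).length : Int) == 2) = false := by
            simp only [beq_eq_false_iff_ne, ne_eq]; omega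
          simp [hbe, hbe2, this]

-- ===== VERDICT (by name: the statement is the Claim_ definition above) =====
theorem has_adjacent_pair_spec : Claim_equal_has_adjacent_pair := by
  intro value _
  unfold Spec_has_adjacent_pair has_adjacent_pair has_adjacent_pair_alt
  cases hv : value.toList with
  | nil => simp [altLoop]
  | cons c rest =>
    show hapLoop c 1 rest = altLoop (c :: rest)
    rw [hapLoop_eq rest c 1]
    simp only [altLoop]
    by_cases h2 : (rest.takeWhile (· == c)).length + 1 = 2
    · simp [h2]; omega
    · have hb : ((rest.takeWhile (· == c)).length + 1 == 2) = false := by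
        simp only [beq_eq_false_iff_ne, ne_eq]; omega
      have hb2 : ((1 : Int) + ((rest.takeWhile (· == c)).length : Int) == 2) = false := by
        simp only [beq_eq_false_iff_ne, ne_eq]; omega
      simp [hb, hb2]
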